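-- pv_equiv track=rewrite | github.com/joelyeger/Hang-Man | nonogram.py | check_if_legal
-- ===== SOURCE A (Python) =====
-- Black = 1
--
-- def check_if_legal(row, blocks):
--     """checks if a complete row is correct according the blocks"""
--     counter = 0
--     compare_lst = []
--     for square in row:
--         if square == Black:
--             counter += 1
--         else:
--             if counter > 0:
--                 compare_lst.append(counter)
--                 counter = 0
--     if counter > 0:
--         compare_lst.append(counter)
--     if compare_lst == blocks:
--         return True
--     return False
-- ===== SOURCE B (Python) =====
-- Black = 1
--
-- def check_if_legal(row, blocks):
--     """checks if a complete row is correct according the blocks"""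
--     runs = []
--     i, n = 0, len(row)
--     while i < n:
--         j = i
--         while j < n and row[j] == row[i]:
--             j += 1
--         if row[i] == Black:
--             runs.append(j - i)
--         i = j
--     return runs == blocks
-- ===== Notes on version B (the rewrite author's own statement) =====
-- stated objective: alternative
-- what changed: replaces the per-element counter/flush state machine (with a post-loop flush) by a two-pointer run scanner that finds each maximal run of equal squares and records the lengths of the Black runs, then compares once
import Mathlib
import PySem

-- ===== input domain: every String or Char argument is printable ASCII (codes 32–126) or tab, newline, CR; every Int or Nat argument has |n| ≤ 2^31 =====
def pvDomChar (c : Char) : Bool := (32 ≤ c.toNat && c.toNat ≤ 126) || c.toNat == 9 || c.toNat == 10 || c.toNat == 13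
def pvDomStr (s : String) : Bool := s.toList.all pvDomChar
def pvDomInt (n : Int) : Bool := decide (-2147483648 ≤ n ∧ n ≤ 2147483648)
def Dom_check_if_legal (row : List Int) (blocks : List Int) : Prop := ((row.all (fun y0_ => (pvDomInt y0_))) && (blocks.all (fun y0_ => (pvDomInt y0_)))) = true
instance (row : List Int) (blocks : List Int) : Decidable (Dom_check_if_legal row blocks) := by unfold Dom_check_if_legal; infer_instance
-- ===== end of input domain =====

-- B replaces A's counter/flush state machine by a two-pointer maximal-run scanner; alternative decomposition, same O(n) cost.

-- ===== PORT A =====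
-- the for-loop over `row` with state (counter, compare_lst)
def pvLoopA : Int → List Int → List Int → Int × List Int
  | counter, lst, [] => (counter, lst)
  | counter, lst, square :: rest =>
    if square == 1 then pvLoopA (counter + 1) lst rest
    else if counter > 0 then pvLoopA 0 (lst ++ [counter]) rest
    else pvLoopA counter lst rest

def check_if_legal (row : List Int) (blocks : List Int) : Bool :=
  let r := pvLoopA 0 [] row
  let compare_lst := if r.1 > 0 then r.2 ++ [r.1] else r.2
  if compare_lst == blocks then true else false

-- ===== PORT B =====
-- the outer while-loop: take the maximal run equal to the head (inner while = takeWhile/dropWhile),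
-- record its length if it is a Black run, continue after it
def pvBlackRuns : List Int → List Int
  | [] => []
  | x :: xs =>
    let rest := xs.dropWhile (fun y => y == x)
    if x == 1 then ((1 : Int) + (xs.takeWhile (fun y => y == x)).length) :: pvBlackRuns rest
    else pvBlackRuns rest
termination_by xs => xs.length
decreasing_by all_goals exact Nat.lt_succ_of_le (List.length_dropWhile_le _ _)

def check_if_legal_alt (row : List Int) (blocks : List Int) : Bool :=
  pvBlackRuns row == blocks

-- ===== PRECONDITION & SPEC =====
def Spec_check_if_legal (row : List Int) (blocks : List Int) (out : Bool) : Prop := out = check_if_legal_alt row blocks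
instance (row : List Int) (blocks : List Int) (out : Bool) : Decidable (Spec_check_if_legal row blocks out) := by unfold Spec_check_if_legal; infer_instance

-- ===== CLAIM (what is proved, stated in full; the proofs are below) =====
def Claim_equal_check_if_legal : Prop := ∀ (row : List Int) (blocks : List Int), Dom_check_if_legal row blocks → Spec_check_if_legal row blocks (check_if_legal row blocks)

-- ===== LEMMAS AND PROOFS =====

-- element-wise characterisation of A's loop result (after the post-loop flush)
def pvConsume : Int → List Int → List Int
  | c, [] => if c > 0 then [c] else []
  | c, x :: xs => if x == 1 then pvConsume (c + 1) xs
                  else (if c > 0 then [c] else []) ++ pvConsume 0 xs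

lemma pvLoopA_char (row : List Int) : ∀ (c : Int) (lst : List Int), 0 ≤ c →
    (let r := pvLoopA c lst row; if r.1 > 0 then r.2 ++ [r.1] else r.2) = lst ++ pvConsume c row := by
  induction row with
  | nil => intro c lst _; simp [pvLoopA, pvConsume]; split <;> simp
  | cons x xs ih =>
    intro c lst hc0
    simp only [pvLoopA, pvConsume]
    by_cases hx : (x == 1) = true
    · simp [hx, ih (c + 1) lst (by omega)]
    · simp only [hx, if_false, Bool.false_eq_true]
      by_cases hc : c > 0
      · simp [hc, ih 0 (lst ++ [c]) le_rfl]
      · have hz : c = 0 := by omega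
        subst hz
        simp [ih 0 lst le_rfl]

-- dropping a leading run of non-Black squares does not change the Black runs
lemma pvBlackRuns_dropWhile (x : Int) (hx : ¬ x = 1) (xs : List Int) :
    pvBlackRuns (xs.dropWhile (fun y => y == x)) = pvBlackRuns xs := by
  cases xs with
  | nil => rfl
  | cons y ys =>
    by_cases hy : y = x
    · subst hy
      rw [List.dropWhile_cons_of_pos (by simp)]
      conv_rhs => rw [pvBlackRuns]
      simp [hx]
    · rw [List.dropWhile_cons_of_neg (by simp [hy])]

-- joint induction: pending-run form and the zero-state form of pvConsume vs pvBlackRuns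
lemma pvConsume_char : ∀ (n : Nat) (xs : List Int), xs.length = n →
    (∀ c : Int, 0 ≤ c → pvConsume (c + 1) xs =
      (c + 1 + ((xs.takeWhile (fun y => y == (1 : Int))).length : Int)) ::
        pvBlackRuns (xs.dropWhile (fun y => y == (1 : Int)))) ∧
    pvConsume 0 xs = pvBlackRuns xs := by
  intro n
  induction n using Nat.strong_induction_on with
  | _ n ih =>
    intro xs hlen
    constructor
    · intro c hc
      cases xs with
      | nil => simp [pvConsume, pvBlackRuns]; omega
      | cons x xs' =>
        by_cases hx : x = 1
        · subst hx
          rw [List.takeWhile_cons_of_pos (by simp), List.dropWhile_cons_of_pos (by simp)]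
          have h1 := (ih xs'.length (by simp [← hlen]) xs' rfl).1 (c + 1) (by omega)
          simp only [pvConsume, if_pos (by simp : ((1:Int) == 1) = true)]
          rw [show c + 1 + 1 = (c + 1) + 1 by ring, h1]
          simp; ring
        · rw [List.takeWhile_cons_of_neg (by simp [hx]), List.dropWhile_cons_of_neg (by simp [hx])]
          have h0 := (ih xs'.length (by simp [← hlen]) xs' rfl).2
          simp only [pvConsume, if_neg (by simp [hx] : ¬ ((x == (1:Int)) = true)),
            if_pos (by omega : c + 1 > 0)]
          rw [h0]
          conv_rhs => rw [pvBlackRuns]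
          simp [hx, pvBlackRuns_dropWhile x hx xs']
    · cases xs with
      | nil => simp [pvConsume, pvBlackRuns]
      | cons x xs' =>
        by_cases hx : x = 1
        · subst hx
          have h1 := (ih xs'.length (by simp [← hlen]) xs' rfl).1 0 le_rfl
          simp only [zero_add] at h1
          simp only [pvConsume, if_pos (by simp : ((1:Int) == 1) = true), zero_add]
          rw [h1]
          conv_rhs => rw [pvBlackRuns]
          simp
        · have h0 := (ih xs'.length (by simp [← hlen]) xs' rfl).2
          simp only [pvConsume, if_neg (by simp [hx] : ¬ ((x == (1:Int)) = true)),
            if_neg (by omega : ¬ ((0:Int) > 0)), List.nil_append]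
          rw [h0]
          conv_rhs => rw [pvBlackRuns]
          simp [hx, pvBlackRuns_dropWhile x hx xs']

-- ===== VERDICT (by name: the statement is the Claim_ definition above) =====
theorem check_if_legal_spec : Claim_equal_check_if_legal := by
  intro row blocks _
  unfold Spec_check_if_legal check_if_legal check_if_legal_alt
  have h := pvLoopA_char row 0 [] le_rfl
  simp only [List.nil_append] at h
  simp only [h, (pvConsume_char row.length row rfl).2]
  cases hb : pvBlackRuns row == blocks <;> simp_all
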